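-- pv_equiv track=rewrite | github.com/Anzhc/Merger-Project | app.py | compute_execution_order
-- ===== SOURCE A (Python) =====
-- def compute_execution_order(sinks, incoming):
--     """Return nodes ordered from outputs backward using DFS."""
--     visited = set()
--     order = []
--
--     def visit(nid):
--         if nid in visited:
--             return
--         visited.add(nid)
--         for parent in incoming.get(nid, []):
--             visit(parent)
--         order.append(nid)
--
--     for s in sinks:
--         visit(s)
--     return order
-- ===== SOURCE B (Python) =====
-- def compute_execution_order(sinks, incoming):
--     """Return nodes ordered from outputs backward using an explicit-stack
--     iterative DFS postorder (same order as the recursive version)."""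
--     visited = set()
--     order = []
--     for s in sinks:
--         if s in visited:
--             continue
--         visited.add(s)
--         stack = [(s, iter(incoming.get(s, [])))]
--         while stack:
--             node, it = stack[-1]
--             p = next(it, None)
--             if p is None:
--                 stack.pop()
--                 order.append(node)
--             elif p not in visited:
--                 visited.add(p)
--                 stack.append((p, iter(incoming.get(p, []))))
--     return order
-- ===== Notes on version B (the rewrite author's own statement) =====
-- stated objective: alternative
-- what changed: Replaces the recursive DFS closure with an explicit-stack iterative postorder (frames holding a node plus an iterator over its remaining parents), so no Python recursion is used while visited-marking on entry and the append-after-parents order are preserved.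
import Mathlib
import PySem

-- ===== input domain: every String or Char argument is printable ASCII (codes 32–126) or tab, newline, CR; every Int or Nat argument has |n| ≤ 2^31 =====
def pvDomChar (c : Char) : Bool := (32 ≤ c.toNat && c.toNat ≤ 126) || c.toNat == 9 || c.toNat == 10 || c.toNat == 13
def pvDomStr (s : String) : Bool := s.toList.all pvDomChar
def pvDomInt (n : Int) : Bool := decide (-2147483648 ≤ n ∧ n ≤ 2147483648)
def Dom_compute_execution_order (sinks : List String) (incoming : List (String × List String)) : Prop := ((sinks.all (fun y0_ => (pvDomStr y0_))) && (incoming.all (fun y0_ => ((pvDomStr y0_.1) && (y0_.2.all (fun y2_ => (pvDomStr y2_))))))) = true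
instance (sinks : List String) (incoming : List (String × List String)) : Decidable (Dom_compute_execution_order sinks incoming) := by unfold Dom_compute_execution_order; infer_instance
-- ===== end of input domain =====

-- B replaces A's recursive DFS with an explicit-stack iterative postorder (same visited set, same order); alternative decomposition, same cost.
-- Both ports carry a fuel argument solely to justify termination; the chosen fuel (number of sinks plus total parent-list length) never runs out on a real run.

-- ===== PORT A =====
-- incoming.get(nid, [])
def pvGetInc (incoming : List (String × List String)) (nid : String) : List String :=
  PySem.Dict.getD (PySem.Dict.mk incoming) nid []

-- the recursive closure `visit`, threading (visited, order); fuel only for termination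
def pvVisitA (incoming : List (String × List String)) :
    Nat → String → PySem.Set String × List String → PySem.Set String × List String
  | 0, _, st => st
  | f+1, nid, st =>
    if st.1.contains nid then st
    else
      let st1 : PySem.Set String × List String := (st.1.add nid, st.2)
      let st2 := (pvGetInc incoming nid).foldl (fun s p => pvVisitA incoming f p s) st1
      (st2.1, st2.2 ++ [nid])

def compute_execution_order (sinks : List String) (incoming : List (String × List String)) : List String :=
  let fuel := (sinks ++ incoming.flatMap (fun kv => kv.2)).length
  (sinks.foldl (fun st s => pvVisitA incoming fuel s st)
    ((PySem.Set.empty : PySem.Set String), ([] : List String))).2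

-- ===== PORT B =====
-- the `while stack:` loop; a frame is (node, list of parents not yet drawn from its iterator)
def pvRunB (incoming : List (String × List String)) :
    Nat → List (String × List String) → PySem.Set String × List String → PySem.Set String × List String
  | _, [], st => st
  | f, (n, []) :: rest, st => pvRunB incoming f rest (st.1, st.2 ++ [n])
  | f, (n, p :: ps) :: rest, st =>
    if st.1.contains p then pvRunB incoming f ((n, ps) :: rest) st
    else
      match f with
      | 0 => st
      | f+1 => pvRunB incoming f ((p, pvGetInc incoming p) :: (n, ps) :: rest) (st.1.add p, st.2)
  termination_by f stack _ => (f, (stack.map (fun fr => fr.2.length + 1)).sum)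
  decreasing_by
  all_goals first
    | (apply Prod.Lex.left; omega)
    | (apply Prod.Lex.right; simp; omega)
    | (apply Prod.Lex.right; simp)

def compute_execution_order_alt (sinks : List String) (incoming : List (String × List String)) : List String :=
  let fuel := (sinks ++ incoming.flatMap (fun kv => kv.2)).length
  (sinks.foldl (fun st s =>
      if st.1.contains s then st
      else pvRunB incoming fuel [(s, pvGetInc incoming s)] (st.1.add s, st.2))
    ((PySem.Set.empty : PySem.Set String), ([] : List String))).2

-- ===== PRECONDITION & SPEC =====
def Spec_compute_execution_order (sinks : List String) (incoming : List (String × List String)) (out : List String) : Prop := out = compute_execution_order_alt sinks incoming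
instance (sinks : List String) (incoming : List (String × List String)) (out : List String) : Decidable (Spec_compute_execution_order sinks incoming out) := by unfold Spec_compute_execution_order; infer_instance

-- ===== CLAIM (what is proved, stated in full; the proofs are below) =====
def Claim_equal_compute_execution_order : Prop := ∀ (sinks : List String) (incoming : List (String × List String)), Dom_compute_execution_order sinks incoming → Spec_compute_execution_order sinks incoming (compute_execution_order sinks incoming)

-- ===== LEMMAS AND PROOFS =====

-- the fold of A's visit over a parent list (proof-side abbreviation; definitionally what the port writes)
def pvFoldA (incoming : List (String × List String)) (f : Nat) (ps : List String)
    (st : PySem.Set String × List String) : PySem.Set String × List String :=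
  ps.foldl (fun s p => pvVisitA incoming f p s) st

-- number of elements of U not yet visited: the real termination measure of both programs
def pvUnvis (U : List String) (v : PySem.Set String) : Nat :=
  U.countP (fun x => decide (x ∉ v))

theorem pvUnvis_le (U : List String) (v : PySem.Set String) : pvUnvis U v ≤ U.length :=
  List.countP_le_length

theorem pvUnvis_mono (U : List String) (v w : PySem.Set String)
    (h : ∀ x, x ∈ v → x ∈ w) : pvUnvis U w ≤ pvUnvis U v := by
  apply List.countP_mono_left
  intro a _ ha
  simp only [decide_eq_true_eq] at *
  exact fun hv => ha (h a hv)

theorem pvUnvis_pos (U : List String) (v : PySem.Set String) (x : String)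
    (hx : x ∈ U) (h : x ∉ v) : 0 < pvUnvis U v := by
  apply List.countP_pos_iff.mpr
  exact ⟨x, hx, by simpa using h⟩

theorem pv_countP_lt {α : Type} (p q : α → Bool) (l : List α)
    (h : ∀ a ∈ l, p a = true → q a = true) (x : α) (hx : x ∈ l)
    (hq : q x = true) (hp : p x = false) : l.countP p < l.countP q := by
  induction l with
  | nil => cases hx
  | cons a l ih =>
    rw [List.countP_cons, List.countP_cons]
    have hmono : l.countP p ≤ l.countP q :=
      List.countP_mono_left (fun b hb => h b (List.mem_cons_of_mem _ hb))
    rcases List.mem_cons.mp hx with rfl | hx'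
    · simp only [hp, hq, if_true, Bool.false_eq_true, if_false]
      omega
    · have hrec := ih (fun b hb => h b (List.mem_cons_of_mem _ hb)) hx'
      have himp := h a (List.mem_cons_self)
      cases hpa : p a
      · simp only [Bool.false_eq_true, if_false]
        split <;> omega
      · simp only [himp hpa, if_true]
        omega

theorem pvUnvis_add_lt (U : List String) (v : PySem.Set String) (x : String)
    (hx : x ∈ U) (h : x ∉ v) : pvUnvis U (v.add x) < pvUnvis U v := by
  apply pv_countP_lt _ _ _ _ x hx (by simpa using h)
  · simp [PySem.Set.mem_add]
  · intro a _ ha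
    simp only [decide_eq_true_eq, PySem.Set.mem_add] at *
    exact fun hv => ha (Or.inl hv)

theorem pv_mem_contains (v : PySem.Set String) (x : String) :
    v.contains x = true ↔ x ∈ v := by
  simp [PySem.Set.contains]

-- A's visit returns immediately on a visited node, at any fuel
theorem pvVisitA_of_mem (incoming : List (String × List String)) (f : Nat) (nid : String)
    (st : PySem.Set String × List String) (h : nid ∈ st.1) :
    pvVisitA incoming f nid st = st := by
  cases f <;> simp [pvVisitA, h]

theorem pvVisitA_of_not_mem (incoming : List (String × List String)) (f : Nat) (nid : String)
    (st : PySem.Set String × List String) (h : nid ∉ st.1) :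
    pvVisitA incoming (f+1) nid st =
      ((pvFoldA incoming f (pvGetInc incoming nid) (st.1.add nid, st.2)).1,
       (pvFoldA incoming f (pvGetInc incoming nid) (st.1.add nid, st.2)).2 ++ [nid]) := by
  simp [pvVisitA, h, pvFoldA]

-- visited only grows through A's fold
mutual
theorem pvVisitA_subset (incoming : List (String × List String)) (f : Nat) (nid : String)
    (st : PySem.Set String × List String) (x : String) (hx : x ∈ st.1) :
    x ∈ (pvVisitA incoming f nid st).1 := by
  cases f with
  | zero => exact hx
  | succ f1 =>
    by_cases hp : nid ∈ st.1
    · rw [pvVisitA_of_mem _ _ _ _ hp]; exact hx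
    · rw [pvVisitA_of_not_mem _ _ _ _ hp]
      exact pvFoldA_subset incoming f1 _ _ x (by simp [PySem.Set.mem_add, hx])
  termination_by (f, 0)
  decreasing_by apply Prod.Lex.left; omega

theorem pvFoldA_subset (incoming : List (String × List String)) (f : Nat) (ps : List String)
    (st : PySem.Set String × List String) (x : String) (hx : x ∈ st.1) :
    x ∈ (pvFoldA incoming f ps st).1 := by
  cases ps with
  | nil => exact hx
  | cons p ps =>
    exact pvFoldA_subset incoming f ps (pvVisitA incoming f p st) x
      (pvVisitA_subset incoming f p st x hx)
  termination_by (f, ps.length + 1)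
  decreasing_by
  all_goals first
    | (apply Prod.Lex.right; omega)
    | (apply Prod.Lex.right; simp; omega)
    | (apply Prod.Lex.right; simp)
end

-- A's fold does not depend on the fuel once the fuel dominates the number of unvisited nodes
theorem pvAF_irrel (U : List String) (incoming : List (String × List String))
    (HU : ∀ p x, x ∈ pvGetInc incoming p → x ∈ U)
    (f g : Nat) (ps : List String) (st : PySem.Set String × List String)
    (hps : ∀ p ∈ ps, p ∈ U) (hf : pvUnvis U st.1 ≤ f) (hg : pvUnvis U st.1 ≤ g) :
    pvFoldA incoming f ps st = pvFoldA incoming g ps st := by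
  match ps with
  | [] => rfl
  | p :: ps' =>
    have hstep : pvVisitA incoming f p st = pvVisitA incoming g p st := by
      by_cases hp : p ∈ st.1
      · rw [pvVisitA_of_mem _ _ _ _ hp, pvVisitA_of_mem _ _ _ _ hp]
      · have hpos : 0 < pvUnvis U st.1 := pvUnvis_pos U st.1 p (hps p (by simp)) hp
        match f, g with
        | 0, _ => omega
        | _+1, 0 => omega
        | f1+1, g1+1 =>
          rw [pvVisitA_of_not_mem _ _ _ _ hp, pvVisitA_of_not_mem _ _ _ _ hp]
          have hlt : pvUnvis U ((st.1.add p, st.2) : PySem.Set String × List String).1 < pvUnvis U st.1 :=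
            pvUnvis_add_lt U st.1 p (hps p (by simp)) hp
          rw [pvAF_irrel U incoming HU f1 g1 (pvGetInc incoming p) (st.1.add p, st.2)
            (fun x hx => HU p x hx) (by omega) (by omega)]
    show pvFoldA incoming f ps' (pvVisitA incoming f p st) =
         pvFoldA incoming g ps' (pvVisitA incoming g p st)
    rw [hstep]
    exact pvAF_irrel U incoming HU f g ps' (pvVisitA incoming g p st)
      (fun q hq => hps q (List.mem_cons_of_mem _ hq))
      (le_trans (pvUnvis_mono U st.1 _ (fun x hx => pvVisitA_subset incoming g p st x hx)) hf)
      (le_trans (pvUnvis_mono U st.1 _ (fun x hx => pvVisitA_subset incoming g p st x hx)) hg)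
  termination_by (f, ps.length)
  decreasing_by
  all_goals first
    | (apply Prod.Lex.left; omega)
    | (apply Prod.Lex.right; simp; omega)
    | (apply Prod.Lex.right; simp)

-- named equations for pvRunB's third arm (well-founded recursion hides them)
theorem pvRunB_cons_mem (incoming : List (String × List String)) (f : Nat) (n p : String)
    (ps : List String) (rest : List (String × List String)) (st : PySem.Set String × List String)
    (hc : st.1.contains p = true) :
    pvRunB incoming f ((n, p :: ps) :: rest) st = pvRunB incoming f ((n, ps) :: rest) st := by
  rw [pvRunB.eq_def]
  show (if st.1.contains p = true then _ else _) = _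
  rw [hc]; simp only [if_true]

theorem pvRunB_cons_push (incoming : List (String × List String)) (f : Nat) (n p : String)
    (ps : List String) (rest : List (String × List String)) (st : PySem.Set String × List String)
    (hc : st.1.contains p = false) :
    pvRunB incoming (f+1) ((n, p :: ps) :: rest) st =
      pvRunB incoming f ((p, pvGetInc incoming p) :: (n, ps) :: rest) (st.1.add p, st.2) := by
  rw [pvRunB.eq_def]
  show (if st.1.contains p = true then _ else _) = _
  rw [hc]; simp only [Bool.false_eq_true, if_false]

-- B's machine does not depend on the fuel either
theorem pvB_irrel (U : List String) (incoming : List (String × List String))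
    (HU : ∀ p x, x ∈ pvGetInc incoming p → x ∈ U)
    (f g : Nat) (stack : List (String × List String)) (st : PySem.Set String × List String)
    (hstack : ∀ fr ∈ stack, ∀ p ∈ fr.2, p ∈ U)
    (hf : pvUnvis U st.1 ≤ f) (hg : pvUnvis U st.1 ≤ g) :
    pvRunB incoming f stack st = pvRunB incoming g stack st := by
  match stack with
  | [] => rw [pvRunB, pvRunB]
  | (n, []) :: rest =>
    rw [pvRunB, pvRunB]
    exact pvB_irrel U incoming HU f g rest (st.1, st.2 ++ [n])
      (fun fr hfr => hstack fr (List.mem_cons_of_mem _ hfr)) hf hg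
  | (n, p :: ps) :: rest =>
    by_cases hp : p ∈ st.1
    · have hc : st.1.contains p = true := (pv_mem_contains st.1 p).mpr hp
      rw [pvRunB_cons_mem _ _ _ _ _ _ _ hc, pvRunB_cons_mem _ _ _ _ _ _ _ hc]
      exact pvB_irrel U incoming HU f g ((n, ps) :: rest) st
        (by intro fr hfr q hq
            rcases List.mem_cons.mp hfr with rfl | hfr
            · exact hstack (n, p :: ps) (by simp) q (List.mem_cons_of_mem _ hq)
            · exact hstack fr (List.mem_cons_of_mem _ hfr) q hq) hf hg
    · have hpU : p ∈ U := hstack (n, p :: ps) (by simp) p (by simp)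
      have hpos : 0 < pvUnvis U st.1 := pvUnvis_pos U st.1 p hpU hp
      have hc : st.1.contains p = false := by
        cases hcc : st.1.contains p
        · rfl
        · exact absurd ((pv_mem_contains st.1 p).mp hcc) hp
      match f, g with
      | 0, _ => omega
      | _+1, 0 => omega
      | f1+1, g1+1 =>
        rw [pvRunB_cons_push _ _ _ _ _ _ _ hc, pvRunB_cons_push _ _ _ _ _ _ _ hc]
        have hlt : pvUnvis U ((st.1.add p, st.2) : PySem.Set String × List String).1 < pvUnvis U st.1 :=
          pvUnvis_add_lt U st.1 p hpU hp
        exact pvB_irrel U incoming HU f1 g1 _ (st.1.add p, st.2)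
          (by intro fr hfr q hq
              rcases List.mem_cons.mp hfr with rfl | hfr
              · exact HU p q hq
              · rcases List.mem_cons.mp hfr with rfl | hfr
                · exact hstack (n, p :: ps) (by simp) q (List.mem_cons_of_mem _ hq)
                · exact hstack fr (List.mem_cons_of_mem _ hfr) q hq)
          (by omega) (by omega)
  termination_by (f, (stack.map (fun fr => fr.2.length + 1)).sum)
  decreasing_by
  all_goals first
    | (apply Prod.Lex.left; omega)
    | (apply Prod.Lex.right; simp; omega)
    | (apply Prod.Lex.right; simp)

-- bridge: running B's machine on a frame plays A's fold over the frame's parents, then appends the node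
theorem pvBR (U : List String) (incoming : List (String × List String))
    (HU : ∀ p x, x ∈ pvGetInc incoming p → x ∈ U)
    (f : Nat) (n : String) (ps : List String) (rest : List (String × List String))
    (st : PySem.Set String × List String)
    (hps : ∀ p ∈ ps, p ∈ U)
    (hrest : ∀ fr ∈ rest, ∀ p ∈ fr.2, p ∈ U)
    (hf : pvUnvis U st.1 ≤ f) :
    pvRunB incoming f ((n, ps) :: rest) st =
      pvRunB incoming f rest
        ((pvFoldA incoming f ps st).1, (pvFoldA incoming f ps st).2 ++ [n]) := by
  match ps with
  | [] => rw [pvRunB]; rfl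
  | p :: ps' =>
    by_cases hp : p ∈ st.1
    · have hc : st.1.contains p = true := (pv_mem_contains st.1 p).mpr hp
      rw [pvRunB_cons_mem _ _ _ _ _ _ _ hc]
      have hfold : pvFoldA incoming f (p :: ps') st = pvFoldA incoming f ps' st := by
        show pvFoldA incoming f ps' (pvVisitA incoming f p st) = _
        rw [pvVisitA_of_mem _ _ _ _ hp]
      rw [hfold]
      exact pvBR U incoming HU f n ps' rest st
        (fun q hq => hps q (List.mem_cons_of_mem _ hq)) hrest hf
    · have hpU : p ∈ U := hps p (by simp)
      have hpos : 0 < pvUnvis U st.1 := pvUnvis_pos U st.1 p hpU hp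
      have hc : st.1.contains p = false := by
        cases hcc : st.1.contains p
        · rfl
        · exact absurd ((pv_mem_contains st.1 p).mp hcc) hp
      match f with
      | 0 => omega
      | f1+1 =>
        rw [pvRunB_cons_push _ _ _ _ _ _ _ hc]
        have hlt : pvUnvis U ((st.1.add p, st.2) : PySem.Set String × List String).1 < pvUnvis U st.1 :=
          pvUnvis_add_lt U st.1 p hpU hp
        have hstack' : ∀ fr ∈ (n, ps') :: rest, ∀ q ∈ fr.2, q ∈ U := by
          intro fr hfr q hq
          rcases List.mem_cons.mp hfr with rfl | hfr
          · exact hps q (List.mem_cons_of_mem _ hq)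
          · exact hrest fr hfr q hq
        rw [pvBR U incoming HU f1 p (pvGetInc incoming p) ((n, ps') :: rest) (st.1.add p, st.2)
              (fun x hx => HU p x hx) hstack' (by omega)]
        have hsub2 : pvUnvis U ((pvFoldA incoming f1 (pvGetInc incoming p) (st.1.add p, st.2)).1,
            (pvFoldA incoming f1 (pvGetInc incoming p) (st.1.add p, st.2)).2 ++ [p]).1
            ≤ pvUnvis U ((st.1.add p, st.2) : PySem.Set String × List String).1 :=
          pvUnvis_mono U _ _ (fun x hx => pvFoldA_subset incoming f1 _ (st.1.add p, st.2) x hx)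
        rw [pvB_irrel U incoming HU f1 (f1+1) ((n, ps') :: rest)
              ((pvFoldA incoming f1 (pvGetInc incoming p) (st.1.add p, st.2)).1,
               (pvFoldA incoming f1 (pvGetInc incoming p) (st.1.add p, st.2)).2 ++ [p])
              hstack' (by omega) (by omega)]
        have hfold : pvFoldA incoming (f1+1) (p :: ps') st =
            pvFoldA incoming (f1+1) ps'
              ((pvFoldA incoming f1 (pvGetInc incoming p) (st.1.add p, st.2)).1,
               (pvFoldA incoming f1 (pvGetInc incoming p) (st.1.add p, st.2)).2 ++ [p]) := by
          show pvFoldA incoming (f1+1) ps' (pvVisitA incoming (f1+1) p st) = _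
          rw [pvVisitA_of_not_mem _ _ _ _ hp]
        rw [hfold]
        exact pvBR U incoming HU (f1+1) n ps' rest
          ((pvFoldA incoming f1 (pvGetInc incoming p) (st.1.add p, st.2)).1,
           (pvFoldA incoming f1 (pvGetInc incoming p) (st.1.add p, st.2)).2 ++ [p])
          (fun q hq => hps q (List.mem_cons_of_mem _ hq)) hrest (by omega)
  termination_by (f, ps.length)
  decreasing_by
  all_goals first
    | (apply Prod.Lex.left; omega)
    | (apply Prod.Lex.right; simp; omega)
    | (apply Prod.Lex.right; simp)

-- the two top-level loops over the sinks agree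
theorem pvTOP (U : List String) (incoming : List (String × List String))
    (HU : ∀ p x, x ∈ pvGetInc incoming p → x ∈ U)
    (F : Nat) (hF : U.length ≤ F)
    (sinks' : List String) (hs : ∀ s ∈ sinks', s ∈ U)
    (st : PySem.Set String × List String) :
    sinks'.foldl (fun st s => pvVisitA incoming F s st) st =
    sinks'.foldl (fun st s =>
      if st.1.contains s then st
      else pvRunB incoming F [(s, pvGetInc incoming s)] (st.1.add s, st.2)) st := by
  induction sinks' generalizing st with
  | nil => rfl
  | cons s sinks' ih =>
    have hsU : s ∈ U := hs s (by simp)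
    have hstep : pvVisitA incoming F s st =
        (if st.1.contains s then st
         else pvRunB incoming F [(s, pvGetInc incoming s)] (st.1.add s, st.2)) := by
      by_cases hp : s ∈ st.1
      · rw [pvVisitA_of_mem _ _ _ _ hp, if_pos ((pv_mem_contains st.1 s).mpr hp)]
      · have hpos : 0 < pvUnvis U st.1 := pvUnvis_pos U st.1 s hsU hp
        have hle : pvUnvis U st.1 ≤ F := le_trans (pvUnvis_le U st.1) hF
        have hc : st.1.contains s = false := by
          cases hcc : st.1.contains s
          · rfl
          · exact absurd ((pv_mem_contains st.1 s).mp hcc) hp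
        rw [if_neg (by simpa using hp)]
        match F, hle with
        | 0, hle => omega
        | F1+1, hle =>
          have hlt : pvUnvis U ((st.1.add s, st.2) : PySem.Set String × List String).1 < pvUnvis U st.1 :=
            pvUnvis_add_lt U st.1 s hsU hp
          rw [pvBR U incoming HU (F1+1) s (pvGetInc incoming s) [] (st.1.add s, st.2)
                (fun x hx => HU s x hx) (by simp) (by omega)]
          rw [pvRunB]
          rw [pvVisitA_of_not_mem _ _ _ _ hp]
          rw [pvAF_irrel U incoming HU F1 (F1+1) (pvGetInc incoming s) (st.1.add s, st.2)
                (fun x hx => HU s x hx) (by omega) (by omega)]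
    show List.foldl _ (pvVisitA incoming F s st) sinks' = _
    rw [hstep]
    exact ih (fun q hq => hs q (List.mem_cons_of_mem _ hq)) _

theorem pvHU (sinks : List String) (incoming : List (String × List String)) :
    ∀ p x, x ∈ pvGetInc incoming p → x ∈ sinks ++ incoming.flatMap (fun kv => kv.2) := by
  intro p x hx
  apply List.mem_append_right
  unfold pvGetInc PySem.Dict.getD PySem.Dict.get? at hx
  cases hfind : List.find? (fun kv => kv.1 == p) incoming with
  | none => rw [hfind] at hx; simp at hx
  | some kv =>
    rw [hfind] at hx
    simp only [Option.map_some, Option.getD_some] at hx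
    exact List.mem_flatMap.mpr ⟨kv, List.mem_of_find?_eq_some hfind, hx⟩

-- ===== VERDICT (by name: the statement is the Claim_ definition above) =====
theorem compute_execution_order_spec : Claim_equal_compute_execution_order := by
  intro sinks incoming _
  unfold Spec_compute_execution_order compute_execution_order compute_execution_order_alt
  exact congrArg Prod.snd
    (pvTOP (sinks ++ incoming.flatMap (fun kv => kv.2)) incoming (pvHU sinks incoming)
      _ le_rfl sinks (fun s hs => List.mem_append_left _ hs) _)
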